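-- pv_equiv track=rewrite | github.com/Matthew-Pidlysny/Empirinometry | Experiment/Support/tray/advanced_sensical_boundary_analysis.py | check_repeating_pattern
-- ===== SOURCE A (Python) =====
-- def check_repeating_pattern(decimal_str, min_length=3):
--     if len(decimal_str) < min_length * 2:
--         return False
--
--     for length in range(min_length, len(decimal_str)//2 + 1):
--         pattern = decimal_str[:length]
--         repetitions = len(decimal_str) // length
--         if pattern * repetitions == decimal_str[:length * repetitions]:
--             return True
--     return False
-- ===== SOURCE B (Python) =====
-- def check_repeating_pattern(decimal_str, min_length=3):
--     # Z-function precompute: build z[i] = length of the longest common prefix of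
--     # decimal_str and decimal_str[i:]; each candidate period L is then tested by
--     # the single comparison z[L] >= L*(n//L) - L.
--     n = len(decimal_str)
--     if n < min_length * 2:
--         return False
--     z = [0] * n
--     l = r = 0
--     for i in range(1, n):
--         if i < r:
--             z[i] = min(r - i, z[i - l])
--         while i + z[i] < n and decimal_str[z[i]] == decimal_str[i + z[i]]:
--             z[i] += 1
--         if i + z[i] > r:
--             l, r = i, i + z[i]
--     for L in range(min_length, n // 2 + 1):
--         if z[L] >= L * (n // L) - L:
--             return True
--     return False
-- ===== Notes on version B (the rewrite author's own statement) =====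
-- stated objective: alternative
-- what changed: Replaces A's per-length build-and-compare of the tiled pattern by a single Z-function precomputation, after which each candidate period length is tested by one comparison against the precomputed z value.
-- outside the precondition, e.g. on check_repeating_pattern('', -1): A returns True, B raises IndexError; on check_repeating_pattern('abc', 0): A raises ZeroDivisionError, B raises ZeroDivisionError
import Mathlib
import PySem

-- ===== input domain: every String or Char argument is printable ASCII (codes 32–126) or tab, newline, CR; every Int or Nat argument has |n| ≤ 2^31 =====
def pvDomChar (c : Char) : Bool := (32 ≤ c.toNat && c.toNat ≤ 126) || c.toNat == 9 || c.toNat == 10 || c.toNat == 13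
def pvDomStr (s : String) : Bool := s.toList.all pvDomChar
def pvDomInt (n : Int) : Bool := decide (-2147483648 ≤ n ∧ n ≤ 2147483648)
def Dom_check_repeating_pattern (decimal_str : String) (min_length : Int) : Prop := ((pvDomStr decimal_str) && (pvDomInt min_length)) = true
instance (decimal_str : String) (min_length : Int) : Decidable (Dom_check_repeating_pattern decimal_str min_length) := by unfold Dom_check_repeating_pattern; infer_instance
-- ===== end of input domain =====

-- B precomputes the Z-function once and tests each candidate period length by one
-- comparison against it, instead of A's per-length build-and-compare of the tiled pattern.

-- ===== PORT A =====
-- the for-loop with early 'return True' over candidate lengths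
def crpLoopA (cs : List Char) (n : Int) : List Int → Bool
  | [] => false
  | length :: rest =>
      let pattern := PySem.List.slice cs none (some length)
      let repetitions := PySem.Int.floordiv n length
      if (List.replicate repetitions.toNat pattern).flatten ==
          PySem.List.slice cs none (some (length * repetitions)) then
        true
      else
        crpLoopA cs n rest

def check_repeating_pattern (decimal_str : String) (min_length : Int) : Bool :=
  let cs := decimal_str.toList
  let n : Int := cs.length
  if n < min_length * 2 then false
  else crpLoopA cs n (PySem.List.pyRange min_length (PySem.Int.floordiv n 2 + 1) 1)

-- ===== PORT B =====
-- the 'while i + z[i] < n and s[z[i]] == s[i + z[i]]: z[i] += 1' extension loop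
def crpExtend (cs : List Char) (n i : Nat) (k : Nat) : Nat :=
  if i + k < n then
    if cs.getD k ' ' == cs.getD (i + k) ' ' then crpExtend cs n i (k + 1) else k
  else k
termination_by n - (i + k)
decreasing_by omega

-- one iteration of the Z-function loop: state (z, l, r), index i
def crpZStep (cs : List Char) (n : Nat) (st : List Nat × Nat × Nat) (i : Nat) :
    List Nat × Nat × Nat :=
  let z := st.1
  let l := st.2.1
  let r := st.2.2
  let z := if i < r then z.set i (min (r - i) (z.getD (i - l) 0)) else z
  let k := crpExtend cs n i (z.getD i 0)
  let z := z.set i k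
  if r < i + k then (z, i, i + k) else (z, l, r)

def check_repeating_pattern_alt (decimal_str : String) (min_length : Int) : Bool :=
  let cs := decimal_str.toList
  let n := cs.length
  if (n : Int) < min_length * 2 then false
  else
    let st := (List.range' 1 (n - 1)).foldl (crpZStep cs n) (List.replicate n 0, 0, 0)
    let z := st.1
    (PySem.List.pyRange min_length (PySem.Int.floordiv (n : Int) 2 + 1) 1).any fun L =>
      decide (L * PySem.Int.floordiv (n : Int) L - L ≤ ((z.getD L.toNat 0 : Nat) : Int))

-- ===== PRECONDITION & SPEC =====
-- Pre_ excludes min_length ≤ 0: there A raises ZeroDivisionError on every string of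
-- length ≥ min_length*2 (the loop reaches length 0), and on the remaining strings
-- (only the empty string with negative min_length) A's True comes from tiling the
-- empty slice zero times — an artefact on which B's Z-array indexing raises instead.
def Pre_check_repeating_pattern (decimal_str : String) (min_length : Int) : Prop :=
  1 ≤ min_length
instance (decimal_str : String) (min_length : Int) : Decidable (Pre_check_repeating_pattern decimal_str min_length) := by
  unfold Pre_check_repeating_pattern; infer_instance

def pvWitness_check_repeating_pattern : String × Int := ("abab", 2)

def Spec_check_repeating_pattern (decimal_str : String) (min_length : Int) (out : Bool) : Prop := out = check_repeating_pattern_alt decimal_str min_length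
instance (decimal_str : String) (min_length : Int) (out : Bool) : Decidable (Spec_check_repeating_pattern decimal_str min_length out) := by unfold Spec_check_repeating_pattern; infer_instance

-- ===== CLAIM (what is proved, stated in full; the proofs are below) =====
def Claim_equal_check_repeating_pattern : Prop := ∀ (decimal_str : String) (min_length : Int), Dom_check_repeating_pattern decimal_str min_length → Pre_check_repeating_pattern decimal_str min_length → Spec_check_repeating_pattern decimal_str min_length (check_repeating_pattern decimal_str min_length)

-- ===== LEMMAS AND PROOFS =====

-- length of the longest common prefix of two lists
def pyLcp : List Char → List Char → Nat
  | a :: as, b :: bs => if a = b then pyLcp as bs + 1 else 0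
  | _, _ => 0

-- z-value specification: lcp of s[i:] with s
def zspec (cs : List Char) (i : Nat) : Nat := pyLcp (cs.drop i) cs

theorem pyLcp_le_left (a b : List Char) : pyLcp a b ≤ a.length := by
  induction a generalizing b with
  | nil => simp [pyLcp]
  | cons x as ih =>
      cases b with
      | nil => simp [pyLcp]
      | cons y bs =>
          simp only [pyLcp]
          split_ifs with h
          · simpa using ih bs
          · simp

theorem take_eq_of_le_pyLcp (a b : List Char) (k : Nat) (h : k ≤ pyLcp a b) :
    a.take k = b.take k := by
  induction a generalizing b k with
  | nil =>
      simp [pyLcp] at h; subst h; simp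
  | cons x as ih =>
      cases b with
      | nil => simp [pyLcp] at h; subst h; simp
      | cons y bs =>
          cases k with
          | zero => simp
          | succ k' =>
              simp only [pyLcp] at h
              split_ifs at h with hxy
              · subst hxy
                simp only [List.take_succ_cons]
                rw [ih bs k' (by omega)]
              · omega

theorem le_pyLcp_of_take_eq (a b : List Char) (k : Nat)
    (heq : a.take k = b.take k) (hk : k ≤ a.length) : k ≤ pyLcp a b := by
  induction a generalizing b k with
  | nil => simp at hk; omega
  | cons x as ih =>
      cases k with
      | zero => omega
      | succ k' =>
          cases b with
          | nil => simp at heq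
          | cons y bs =>
              simp only [List.take_succ_cons, List.cons.injEq] at heq
              simp only [pyLcp]
              rw [if_pos heq.1]
              have := ih bs k' heq.2 (by simp at hk; omega)
              omega

theorem pyLcp_getD_eq (a b : List Char) (j : Nat) (h : j < pyLcp a b) :
    a.getD j ' ' = b.getD j ' ' := by
  induction a generalizing b j with
  | nil => simp [pyLcp] at h
  | cons x as ih =>
      cases b with
      | nil => simp [pyLcp] at h
      | cons y bs =>
          simp only [pyLcp] at h
          split_ifs at h with hxy
          · cases j with
            | zero => simpa using hxy
            | succ j' => simpa using ih bs j' (by omega)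
          · omega

theorem pyLcp_getD_ne (a b : List Char) (h1 : pyLcp a b < a.length)
    (h2 : pyLcp a b < b.length) : a.getD (pyLcp a b) ' ' ≠ b.getD (pyLcp a b) ' ' := by
  induction a generalizing b with
  | nil => simp at h1
  | cons x as ih =>
      cases b with
      | nil => simp at h2
      | cons y bs =>
          by_cases hxy : x = y
          · simp only [pyLcp, if_pos hxy] at h1 h2 ⊢
            simpa using ih bs (by simpa using h1) (by simpa using h2)
          · simp only [pyLcp, if_neg hxy] at h1 h2 ⊢
            simpa using hxy

theorem zspec_le (cs : List Char) (i : Nat) : zspec cs i ≤ cs.length - i := by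
  have := pyLcp_le_left (cs.drop i) cs
  simpa [zspec] using this

theorem getD_drop (cs : List Char) (i j : Nat) :
    (cs.drop i).getD j ' ' = cs.getD (i + j) ' ' := by
  simp [List.getD_eq_getElem?_getD, List.getElem?_drop]

-- the extension loop computes exactly zspec, from any valid lower bound k
theorem crpExtend_eq (cs : List Char) (i : Nat) :
    ∀ k, k ≤ zspec cs i → crpExtend cs cs.length i k = zspec cs i := by
  have hzdef : zspec cs i = pyLcp (cs.drop i) cs := rfl
  have hzle : zspec cs i ≤ cs.length - i := zspec_le cs i
  have hdl : (cs.drop i).length = cs.length - i := List.length_drop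
  suffices main : ∀ d k, zspec cs i - k = d → k ≤ zspec cs i →
      crpExtend cs cs.length i k = zspec cs i by
    intro k hk; exact main (zspec cs i - k) k rfl hk
  intro d
  induction d with
  | zero =>
      intro k hdk hk
      have hkz : k = zspec cs i := by omega
      subst hkz
      rw [crpExtend]
      by_cases hin : i + zspec cs i < cs.length
      · have hne : (cs.drop i).getD (zspec cs i) ' ' ≠ cs.getD (zspec cs i) ' ' := by
          rw [hzdef]
          apply pyLcp_getD_ne
          · omega
          · omega
        rw [getD_drop] at hne
        have hbeq : (cs.getD (zspec cs i) ' ' == cs.getD (i + zspec cs i) ' ') = false := by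
          simp only [beq_eq_false_iff_ne, ne_eq]
          intro h; exact hne h.symm
        rw [if_pos hin, hbeq]; simp
      · rw [if_neg hin]
  | succ d' ih =>
      intro k hdk hk
      have hklt : k < zspec cs i := by omega
      have hin : i + k < cs.length := by omega
      have heq : cs.getD k ' ' = cs.getD (i + k) ' ' := by
        have := pyLcp_getD_eq (cs.drop i) cs k (by omega)
        rw [getD_drop] at this
        exact this.symm
      rw [crpExtend, if_pos hin]
      rw [show (cs.getD k ' ' == cs.getD (i + k) ' ') = true by simpa using heq]
      simp only [if_true]
      exact ih (k + 1) (by omega) (by omega)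

-- list take agreement transported under drop
theorem take_agree_drop (a b : List Char) (m j t : Nat)
    (h : a.take m = b.take m) (hjt : j + t ≤ m) :
    (a.drop j).take t = (b.drop j).take t := by
  have e1 : (a.drop j).take t = (a.take (j + t)).drop j := by
    rw [List.drop_take]; congr 1; omega
  have e2 : (b.drop j).take t = (b.take (j + t)).drop j := by
    rw [List.drop_take]; congr 1; omega
  rw [e1, e2]
  have : a.take (j + t) = b.take (j + t) := by
    have := congrArg (List.take (j + t)) h
    simpa [List.take_take, Nat.min_eq_left hjt] using this
  rw [this]

-- getD through List.set
theorem getD_set_self (l : List Nat) (i : Nat) (v : Nat) (h : i < l.length) :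
    (l.set i v).getD i 0 = v := by
  simp [List.getD_eq_getElem?_getD, h]

theorem getD_set_ne (l : List Nat) (i j : Nat) (v : Nat) (h : i ≠ j) :
    (l.set i v).getD j 0 = l.getD j 0 := by
  simp [List.getD_eq_getElem?_getD, List.getElem?_set_ne h]

-- invariant of the Z-function loop before processing index i
def ZInv (cs : List Char) (i : Nat) (st : List Nat × Nat × Nat) : Prop :=
  st.1.length = cs.length ∧
  (∀ j, 1 ≤ j → j < i → st.1.getD j 0 = zspec cs j) ∧
  (∀ j, i ≤ j → st.1.getD j 0 = 0) ∧
  ((st.2.1 = 0 ∧ st.2.2 = 0) ∨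
    (1 ≤ st.2.1 ∧ st.2.1 < i ∧ st.2.1 ≤ st.2.2 ∧ st.2.2 ≤ cs.length ∧
      st.2.2 - st.2.1 ≤ zspec cs st.2.1))

theorem crpZStep_inv (cs : List Char) (i : Nat) (st : List Nat × Nat × Nat)
    (hinv : ZInv cs i st) (hi1 : 1 ≤ i) (hin : i < cs.length) :
    ZInv cs (i + 1) (crpZStep cs cs.length st i) := by
  obtain ⟨z, l, r⟩ := st
  obtain ⟨hlen, hdone, hzero, hwin⟩ := hinv
  simp only at hlen hdone hzero hwin
  unfold crpZStep
  by_cases hir : i < r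
  all_goals simp only [hir, if_true, if_false]
  · -- window case: z[i] is initialised to min(r-i, z[i-l]), a lower bound of zspec
    rcases hwin with ⟨hl0, hr0⟩ | ⟨hl1, hli, hlr, hrn, hwz⟩
    · omega
    have hj1 : 1 ≤ i - l := by omega
    have hji : i - l < i := by omega
    have hzj : z.getD (i - l) 0 = zspec cs (i - l) := hdone _ hj1 hji
    have hzdef : zspec cs (i - l) = pyLcp (cs.drop (i - l)) cs := rfl
    have hzdefl : zspec cs l = pyLcp (cs.drop l) cs := rfl
    set init := min (r - i) (zspec cs (i - l)) with hinit
    have hwtake : (cs.drop l).take (r - l) = cs.take (r - l) :=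
      take_eq_of_le_pyLcp _ _ _ (by omega)
    have hstep1 : ((cs.drop l).drop (i - l)).take init = ((cs.drop (i - l))).take init := by
      exact take_agree_drop _ _ (r - l) (i - l) init hwtake (by omega)
    have hdd : (cs.drop l).drop (i - l) = cs.drop i := by
      rw [List.drop_drop]; congr 1; omega
    have hstep2 : (cs.drop (i - l)).take init = cs.take init :=
      take_eq_of_le_pyLcp _ _ _ (by omega)
    have htake : (cs.drop i).take init = cs.take init := by
      rw [← hdd, hstep1, hstep2]
    have hinitle : init ≤ zspec cs i := by
      apply le_pyLcp_of_take_eq _ _ _ htake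
      rw [List.length_drop]; omega
    have hz0 : ((z.set i (min (r - i) (z.getD (i - l) 0))).getD i 0) = init := by
      rw [hzj, getD_set_self _ _ _ (by omega)]
    rw [hz0, crpExtend_eq cs i init hinitle, List.set_set]
    have hzn : zspec cs i ≤ cs.length - i := zspec_le cs i
    by_cases hc : r < i + zspec cs i
    all_goals first | rw [if_pos hc] | rw [if_neg hc]
    all_goals refine ⟨by simp [hlen], ?_, ?_, ?_⟩
    · intro j hj1' hji'
      by_cases hji2 : j = i
      · rw [hji2, getD_set_self _ _ _ (by omega)]
      · rw [getD_set_ne _ _ _ _ (by omega : i ≠ j), hdone j hj1' (by omega)]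
    · intro j hj
      rw [getD_set_ne _ _ _ _ (by omega : i ≠ j), hzero j (by omega)]
    · right
      show 1 ≤ i ∧ i < i + 1 ∧ i ≤ i + zspec cs i ∧ i + zspec cs i ≤ cs.length ∧
        i + zspec cs i - i ≤ zspec cs i
      exact ⟨by omega, by omega, by omega, by omega, by omega⟩
    · intro j hj1' hji'
      by_cases hji2 : j = i
      · rw [hji2, getD_set_self _ _ _ (by omega)]
      · rw [getD_set_ne _ _ _ _ (by omega : i ≠ j), hdone j hj1' (by omega)]
    · intro j hj
      rw [getD_set_ne _ _ _ _ (by omega : i ≠ j), hzero j (by omega)]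
    · right; exact ⟨hl1, Nat.lt_succ_of_lt hli, hlr, hrn, hwz⟩
  · -- no window: z[i] starts at its initial 0
    have hz0 : z.getD i 0 = 0 := hzero i (le_refl i)
    rw [hz0, crpExtend_eq cs i 0 (Nat.zero_le _)]
    have hzn : zspec cs i ≤ cs.length - i := zspec_le cs i
    by_cases hc : r < i + zspec cs i
    all_goals first | rw [if_pos hc] | rw [if_neg hc]
    all_goals refine ⟨by simp [hlen], ?_, ?_, ?_⟩
    · intro j hj1' hji'
      by_cases hji2 : j = i
      · rw [hji2, getD_set_self _ _ _ (by omega)]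
      · rw [getD_set_ne _ _ _ _ (by omega : i ≠ j), hdone j hj1' (by omega)]
    · intro j hj
      rw [getD_set_ne _ _ _ _ (by omega : i ≠ j), hzero j (by omega)]
    · right
      show 1 ≤ i ∧ i < i + 1 ∧ i ≤ i + zspec cs i ∧ i + zspec cs i ≤ cs.length ∧
        i + zspec cs i - i ≤ zspec cs i
      exact ⟨by omega, by omega, by omega, by omega, by omega⟩
    · intro j hj1' hji'
      by_cases hji2 : j = i
      · rw [hji2, getD_set_self _ _ _ (by omega)]
      · rw [getD_set_ne _ _ _ _ (by omega : i ≠ j), hdone j hj1' (by omega)]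
    · intro j hj
      rw [getD_set_ne _ _ _ _ (by omega : i ≠ j), hzero j (by omega)]
    · rcases hwin with ⟨hl0, hr0⟩ | ⟨hl1, hli, hlr, hrn, hwz⟩
      · left; exact ⟨hl0, hr0⟩
      · right; exact ⟨hl1, Nat.lt_succ_of_lt hli, hlr, hrn, hwz⟩

theorem crpZ_fold_inv (cs : List Char) :
    ∀ (cnt i : Nat) (st : List Nat × Nat × Nat), ZInv cs i st → 1 ≤ i →
      i + cnt ≤ cs.length →
      ZInv cs (i + cnt) ((List.range' i cnt).foldl (crpZStep cs cs.length) st) := by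
  intro cnt
  induction cnt with
  | zero => intro i st h _ _; simpa using h
  | succ c ih =>
      intro i st h hi1 hle
      rw [List.range'_succ]
      simp only [List.foldl_cons]
      have := ih (i + 1) (crpZStep cs cs.length st i)
        (crpZStep_inv cs i st h hi1 (by omega)) (by omega) (by omega)
      simpa [Nat.add_assoc, Nat.add_comm 1 c] using this

-- A's loop is the 'any' of its per-length test
theorem crpLoopA_eq_any (cs : List Char) (n : Int) (lst : List Int) :
    crpLoopA cs n lst = lst.any (fun length =>
      (List.replicate (PySem.Int.floordiv n length).toNat
          (PySem.List.slice cs none (some length))).flatten ==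
        PySem.List.slice cs none (some (length * PySem.Int.floordiv n length))) := by
  induction lst with
  | nil => rfl
  | cons L rest ih =>
      simp only [crpLoopA, List.any_cons, ih]
      by_cases h : (List.replicate (PySem.Int.floordiv n L).toNat
          (PySem.List.slice cs none (some L))).flatten ==
            PySem.List.slice cs none (some (L * PySem.Int.floordiv n L)) <;> simp [h]

theorem any_congr_mem {α : Type} (l : List α) (p q : α → Bool)
    (h : ∀ x ∈ l, p x = q x) : l.any p = l.any q := by
  induction l with
  | nil => rfl
  | cons a t ih =>
      simp only [List.any_cons, h a (List.mem_cons_self), ih (fun x hx => h x (List.mem_cons_of_mem a hx))]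

-- if t is r blocks of p, then t shifted by |p| matches t's prefix of length |t| - |p|
theorem rep_shift {α : Type} (p : List α) (r : Nat) :
    ((List.replicate r p).flatten).drop p.length =
      ((List.replicate r p).flatten).take ((List.replicate r p).flatten.length - p.length) := by
  cases r with
  | zero => simp
  | succ k =>
      have h1 : (List.replicate (k+1) p).flatten = p ++ (List.replicate k p).flatten := by
        simp [List.replicate_succ]
      have h2 : (List.replicate (k+1) p).flatten = (List.replicate k p).flatten ++ p := by
        rw [List.replicate_succ']; simp
      have hlen : (List.replicate (k+1) p).flatten.length - p.length
          = (List.replicate k p).flatten.length := by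
        simp [Nat.succ_mul]
      rw [hlen]
      conv_lhs => rw [h1]
      conv_rhs => rw [h2]
      rw [List.drop_left, List.take_left]

-- converse: a shift-periodic list of length ln*r is r blocks of its first ln elements
theorem shift_rep (ln : Nat) :
    ∀ (r : Nat) (t : List Char), t.length = ln * r →
      t.drop ln = t.take (ln * r - ln) →
      (List.replicate r (t.take ln)).flatten = t := by
  intro r
  induction r with
  | zero =>
      intro t hlen _
      have : t = [] := List.eq_nil_iff_length_eq_zero.mpr (by omega)
      simp [this]
  | succ k ih =>
      intro t hlen hshift
      have hshift' : t.drop ln = t.take (ln * k) := by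
        have e : ln * (k+1) - ln = ln * k := by rw [Nat.mul_succ]; omega
        rw [← e]; exact hshift
      have hlen' : (t.drop ln).length = ln * k := by
        rw [List.length_drop, hlen, Nat.mul_succ]; omega
      have hrep : (List.replicate k ((t.drop ln).take ln)).flatten = t.drop ln := by
        apply ih _ hlen'
        have e1 : (t.drop ln).drop ln = ((t.take (ln * k)).drop ln) := by rw [← hshift']
        have e2 : ((t.take (ln * k)).drop ln) = (t.drop ln).take (ln * k - ln) := List.drop_take
        rw [e1, e2]
      have hgoal : (List.replicate (k+1) (t.take ln)).flatten
          = t.take ln ++ (List.replicate k (t.take ln)).flatten := by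
        simp [List.replicate_succ]
      rw [hgoal]
      rcases Nat.eq_zero_or_pos k with hk | hk
      · subst hk
        have hT : t.take ln = t := List.take_of_length_le (by omega)
        simp [hT]
      · have hfirst : (t.drop ln).take ln = t.take ln := by
          rw [hshift', List.take_take]
          congr 1
          have : ln ≤ ln * k := Nat.le_mul_of_pos_right ln hk
          omega
        rw [hfirst] at hrep
        rw [hrep, List.take_append_drop]

-- the two per-length tests agree (Nat form)
theorem period_core (cs : List Char) (ln r : Nat) (h1 : 1 ≤ ln) (hr : 1 ≤ r)
    (hle : ln * r ≤ cs.length) :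
    ((List.replicate r (cs.take ln)).flatten = cs.take (ln * r)) ↔
      ((cs.drop ln).take (ln * r - ln) = cs.take (ln * r - ln)) := by
  set t := cs.take (ln * r) with ht
  have hlen : t.length = ln * r := by rw [ht, List.length_take]; omega
  have hfirst : t.take ln = cs.take ln := by
    rw [ht, List.take_take]
    congr 1
    have : ln ≤ ln * r := Nat.le_mul_of_pos_right ln hr
    omega
  have hdrop : t.drop ln = (cs.drop ln).take (ln * r - ln) := by
    rw [ht, List.drop_take]
  have htk : t.take (ln * r - ln) = cs.take (ln * r - ln) := by
    rw [ht, List.take_take]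
    congr 1
    omega
  rw [← hfirst, ← hdrop, ← htk]
  constructor
  · intro h
    have hplen : (t.take ln).length = ln := by
      rw [List.length_take, hlen]
      have : ln ≤ ln * r := Nat.le_mul_of_pos_right ln hr
      omega
    have := rep_shift (t.take ln) r
    rw [h, hplen, hlen] at this
    exact this
  · intro h
    apply shift_rep ln r t hlen
    rw [hdrop, htk] at h ⊢
    exact h

-- the per-length tests of A and of B agree, with z[L] replaced by its value zspec
theorem pred_eq (cs : List Char) (L : Int) (h1 : 1 ≤ L)
    (h2 : L ≤ PySem.Int.floordiv (cs.length : Int) 2) :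
    ((List.replicate (PySem.Int.floordiv (cs.length : Int) L).toNat
        (PySem.List.slice cs none (some L))).flatten ==
      PySem.List.slice cs none (some (L * PySem.Int.floordiv (cs.length : Int) L)))
    = decide (L * PySem.Int.floordiv (cs.length : Int) L - L ≤ ((zspec cs L.toNat : Nat) : Int)) := by
  set nn := cs.length with hnn
  set ln := L.toNat with hln
  have hL : L = (ln : Int) := by omega
  have hfd2 : PySem.Int.floordiv (nn : Int) 2 = ((nn / 2 : Nat) : Int) := by
    exact_mod_cast PySem.Int.floordiv_natCast nn 2
  have hln1 : 1 ≤ ln := by omega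
  have hlnle : ln ≤ nn / 2 := by rw [hfd2] at h2; omega
  have hfd : PySem.Int.floordiv (nn : Int) L = ((nn / ln : Nat) : Int) := by
    rw [hL]; exact_mod_cast PySem.Int.floordiv_natCast nn ln
  set r := nn / ln with hrdef
  have hnn2 : nn / 2 * 2 ≤ nn := Nat.div_mul_le_self nn 2
  have hr2 : 2 ≤ r := by
    rw [hrdef]
    exact (Nat.le_div_iff_mul_le (by omega)).mpr (by omega)
  have hle : ln * r ≤ nn := by
    rw [hrdef, Nat.mul_comm]
    exact Nat.div_mul_le_self nn ln
  have hmul : L * PySem.Int.floordiv (nn : Int) L = ((ln * r : Nat) : Int) := by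
    rw [hfd, hL]; push_cast; ring
  have hsub : L * PySem.Int.floordiv (nn : Int) L - L = (((ln * r - ln : Nat)) : Int) := by
    rw [hmul, hL]
    have : ln ≤ ln * r := Nat.le_mul_of_pos_right ln (by omega)
    omega
  rw [hsub, hmul, hfd, hL]
  rw [PySem.List.slice_to_natCast, PySem.List.slice_to_natCast, Int.toNat_natCast]
  rw [Bool.eq_iff_iff]
  simp only [beq_iff_eq, decide_eq_true_eq, Int.ofNat_le]
  rw [period_core cs ln r hln1 (by omega) hle]
  constructor
  · intro h
    exact le_pyLcp_of_take_eq _ _ _ h (by rw [List.length_drop]; omega)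
  · intro h
    exact take_eq_of_le_pyLcp _ _ _ h

-- ===== VERDICT (by name: the statement is the Claim_ definition above) =====
theorem check_repeating_pattern_spec : Claim_equal_check_repeating_pattern := by
  intro s m _dom pre
  unfold Pre_check_repeating_pattern at pre
  unfold Spec_check_repeating_pattern check_repeating_pattern check_repeating_pattern_alt
  simp only []
  set cs := s.toList with hcs
  by_cases hg : ((cs.length : Int)) < m * 2
  · rw [if_pos hg, if_pos hg]
  · rw [if_neg hg, if_neg hg]
    rw [crpLoopA_eq_any]
    apply any_congr_mem
    intro L hL
    rw [PySem.List.mem_pyRange_one] at hL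
    have h1 : 1 ≤ L := by omega
    have h2 : L ≤ PySem.Int.floordiv ((cs.length : Int)) 2 := by omega
    -- n ≥ 2 on any member
    have hfd2 : PySem.Int.floordiv ((cs.length : Int)) 2 = ((cs.length / 2 : Nat) : Int) := by
      exact_mod_cast PySem.Int.floordiv_natCast cs.length 2
    have hn2 : 2 ≤ cs.length := by
      rw [hfd2] at h2
      by_contra hcon
      interval_cases h : cs.length <;> simp_all <;> omega
    -- the computed z agrees with zspec on 1 ≤ j < n
    have hinv0 : ZInv cs 1 (List.replicate cs.length 0, 0, 0) := by
      refine ⟨by simp, ?_, ?_, Or.inl ⟨rfl, rfl⟩⟩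
      · intro j hj1 hj2; omega
      · intro j _
        by_cases h : j < cs.length <;>
          simp [List.getD_eq_getElem?_getD, h]
    have hfold := crpZ_fold_inv cs (cs.length - 1) 1 _ hinv0 (le_refl 1) (by omega)
    have hfin : 1 + (cs.length - 1) = cs.length := by omega
    rw [hfin] at hfold
    obtain ⟨_, hvals, _, _⟩ := hfold
    have hLn : L.toNat < cs.length := by
      rw [hfd2] at h2
      have : cs.length / 2 < cs.length := Nat.div_lt_self (by omega) (by omega)
      omega
    rw [hvals L.toNat (by omega) hLn]
    exact pred_eq cs L h1 h2

theorem pv_witness_ok :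
    Dom_check_repeating_pattern (pvWitness_check_repeating_pattern.1) (pvWitness_check_repeating_pattern.2) ∧
    Pre_check_repeating_pattern (pvWitness_check_repeating_pattern.1) (pvWitness_check_repeating_pattern.2) := by
  constructor <;> decide
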